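-- pv_equiv track=rewrite | github.com/skvcool-rgb/KOS-Organism | kos/dsl_engine.py | _detect_repeat_unit
-- ===== SOURCE A (Python) =====
-- def _detect_repeat_unit(grid):
--     """Find the smallest repeating tile in the grid."""
--     if not grid:
--         return grid
--     h, w = len(grid), len(grid[0])
--
--     for th in range(1, h+1):
--         if h % th != 0:
--             continue
--         for tw in range(1, w+1):
--             if w % tw != 0:
--                 continue
--             # Check if (th x tw) tile repeats to fill grid
--             tile = [grid[i][j] for i in range(th) for j in range(tw)]
--             match = True
--             for i in range(h):
--                 for j in range(w):
--                     if grid[i][j] != tile[(i % th) * tw + (j % tw)]: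
--                         match = False
--                         break
--                 if not match:
--                     break
--             if match:
--                 return [grid[i][:tw] for i in range(th)]
--
--     return grid  # No repeat found
-- ===== SOURCE B (Python) =====
-- def _detect_repeat_unit(grid):
--     """Find the smallest repeating tile: minimal vertical and horizontal periods found independently."""
--     if not grid or not grid[0]:
--         return grid
--     h, w = len(grid), len(grid[0])
--
--     def vert_ok(th):
--         return all(grid[i][j] == grid[i % th][j] for i in range(h) for j in range(w))
--
--     def horiz_ok(tw):
--         return all(grid[i][j] == grid[i][j % tw] for i in range(h) for j in range(w))
--
--     th = next((t for t in range(1, h + 1) if h % t == 0 and vert_ok(t)), h)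
--     tw = next((t for t in range(1, w + 1) if w % t == 0 and horiz_ok(t)), w)
--     return [grid[i][:tw] for i in range(th)]
-- ===== Notes on version B (the rewrite author's own statement) =====
-- stated objective: alternative
-- what changed: The tile-repeat test factorizes, so B finds the minimal vertical and minimal horizontal period divisors in two independent linear searches instead of A's nested search over all divisor pairs with a full grid check per pair (fewer checks asymptotically, though not measurably faster on the generated inputs).
import Mathlib
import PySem

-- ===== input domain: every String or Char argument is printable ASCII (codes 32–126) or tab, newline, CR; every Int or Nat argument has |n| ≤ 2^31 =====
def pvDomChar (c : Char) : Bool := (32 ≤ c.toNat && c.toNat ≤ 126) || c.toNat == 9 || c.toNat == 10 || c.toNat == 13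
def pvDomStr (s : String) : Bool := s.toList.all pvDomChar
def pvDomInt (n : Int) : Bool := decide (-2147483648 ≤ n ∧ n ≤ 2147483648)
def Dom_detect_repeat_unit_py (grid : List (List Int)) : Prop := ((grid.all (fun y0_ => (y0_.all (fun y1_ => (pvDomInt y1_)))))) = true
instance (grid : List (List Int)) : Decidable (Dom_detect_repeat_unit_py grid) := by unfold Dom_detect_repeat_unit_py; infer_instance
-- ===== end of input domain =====

-- B finds the minimal vertical and horizontal tile periods independently (the tile condition
-- factorizes), replacing A's search over all divisor pairs; same return value on all
-- grids whose rows are at least as long as the first row.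


-- grid[i][j] for nonnegative indices (exact under Pre_, where every access performed is in range)
def pvG (grid : List (List Int)) (i j : Nat) : Int := (grid.getD i []).getD j 0

-- ===== PORT A =====
-- tile = [grid[i][j] for i in range(th) for j in range(tw)]
def pvTileA (grid : List (List Int)) (th tw : Nat) : List Int :=
  (List.range th).flatMap (fun i => (List.range tw).map (fun j => pvG grid i j))

-- the match loop (List.all short-circuits like the Python break)
def pvMatchA (grid : List (List Int)) (h w th tw : Nat) (tile : List Int) : Bool :=
  (List.range h).all (fun i => (List.range w).all (fun j =>
    pvG grid i j == tile.getD ((i % th) * tw + (j % tw)) 0))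

-- inner 'for tw in range(1, w+1)' loop with its early return
def pvLoopTwA (grid : List (List Int)) (h w th : Nat) : List Nat → Option (List (List Int))
  | [] => none
  | tw :: rest =>
    if w % tw ≠ 0 then pvLoopTwA grid h w th rest
    else if pvMatchA grid h w th tw (pvTileA grid th tw) then
      some ((List.range th).map (fun i => (grid.getD i []).take tw))
    else pvLoopTwA grid h w th rest

-- outer 'for th in range(1, h+1)' loop; the inner loop's return propagates (orElse)
def pvLoopThA (grid : List (List Int)) (h w : Nat) : List Nat → Option (List (List Int))
  | [] => none
  | th :: rest =>
    if h % th ≠ 0 then pvLoopThA grid h w rest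
    else (pvLoopTwA grid h w th (List.range' 1 w)).or (pvLoopThA grid h w rest)

def detect_repeat_unit_py (grid : List (List Int)) : List (List Int) :=
  if grid.isEmpty then grid
  else (pvLoopThA grid grid.length (grid.headD []).length
          (List.range' 1 grid.length)).getD grid   -- final 'return grid  # No repeat found'

-- ===== PORT B =====
def pvVert (grid : List (List Int)) (h w th : Nat) : Bool :=
  (List.range h).all (fun i => (List.range w).all (fun j =>
    pvG grid i j == pvG grid (i % th) j))

def pvHoriz (grid : List (List Int)) (h w tw : Nat) : Bool :=
  (List.range h).all (fun i => (List.range w).all (fun j =>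
    pvG grid i j == pvG grid i (j % tw)))

def detect_repeat_unit_py_alt (grid : List (List Int)) : List (List Int) :=
  if grid.isEmpty || (grid.headD []).isEmpty then grid
  else
    let h := grid.length
    let w := (grid.headD []).length
    let th := ((List.range' 1 h).find? (fun t => h % t == 0 && pvVert grid h w t)).getD h
    let tw := ((List.range' 1 w).find? (fun t => w % t == 0 && pvHoriz grid h w t)).getD w
    (List.range th).map (fun i => (grid.getD i []).take tw)

-- ===== PRECONDITION & SPEC =====
-- Pre_ excludes exactly the grids having a row shorter than the first row: on those A always
-- raises IndexError (any returning search scans every cell grid[i][j] for j < len(grid[0])).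
def Pre_detect_repeat_unit_py (grid : List (List Int)) : Prop :=
  ∀ r ∈ grid, (grid.headD []).length ≤ r.length
instance (grid : List (List Int)) : Decidable (Pre_detect_repeat_unit_py grid) := by unfold Pre_detect_repeat_unit_py; infer_instance
def pvWitness_detect_repeat_unit_py : List (List Int) := [[1, 2], [1, 2]]

def Spec_detect_repeat_unit_py (grid : List (List Int)) (out : List (List Int)) : Prop := out = detect_repeat_unit_py_alt grid
instance (grid : List (List Int)) (out : List (List Int)) : Decidable (Spec_detect_repeat_unit_py grid out) := by unfold Spec_detect_repeat_unit_py; infer_instance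

-- ===== CLAIM (what is proved, stated in full; the proofs are below) =====
def Claim_equal_detect_repeat_unit_py : Prop := ∀ (grid : List (List Int)), Dom_detect_repeat_unit_py grid → Pre_detect_repeat_unit_py grid → Spec_detect_repeat_unit_py grid (detect_repeat_unit_py grid)

-- ===== LEMMAS AND PROOFS =====

lemma pv_flat_getD (f : Nat → List Int) (tw : Nat) (hf : ∀ i, (f i).length = tw)
    {b : Nat} (hb : b < tw) : ∀ (n s a : Nat), a < n →
    ((List.range' s n).flatMap f).getD (a * tw + b) 0 = (f (s + a)).getD b 0 := by
  intro n
  induction n with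
  | zero => intro s a ha; omega
  | succ n ih =>
    intro s a ha
    rw [List.range'_succ, List.flatMap_cons]
    cases a with
    | zero =>
      simp only [Nat.zero_mul, Nat.zero_add, Nat.add_zero]
      rw [List.getD_append (f s) _ 0 b (by rw [hf]; omega)]
    | succ a' =>
      rw [List.getD_append_right (f s) _ 0 ((a' + 1) * tw + b)
            (by rw [hf]; nlinarith [Nat.succ_mul a' tw])]
      have he : (a' + 1) * tw + b - (f s).length = a' * tw + b := by
        rw [hf]; ring_nf; omega
      rw [he, ih (s + 1) a' (by omega)]
      congr 2
      omega

lemma pv_tile_getD (grid : List (List Int)) (th tw : Nat) {a b : Nat}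
    (ha : a < th) (hb : b < tw) :
    (pvTileA grid th tw).getD (a * tw + b) 0 = pvG grid a b := by
  unfold pvTileA
  rw [show List.range th = List.range' 0 th from List.range_eq_range']
  rw [pv_flat_getD (fun i => (List.range tw).map (fun j => pvG grid i j)) tw
        (by intro i; simp) hb th 0 a ha]
  simp [List.getD_eq_getElem?_getD, hb]

lemma pv_match_eq (grid : List (List Int)) (h w : Nat) {th tw : Nat}
    (hth : 0 < th) (htw : 0 < tw) :
    pvMatchA grid h w th tw (pvTileA grid th tw) = (pvVert grid h w th && pvHoriz grid h w tw) := by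
  rw [Bool.eq_iff_iff]
  simp only [pvMatchA, pvVert, pvHoriz, Bool.and_eq_true, List.all_eq_true, List.mem_range,
    beq_iff_eq]
  constructor
  · intro M
    have M' : ∀ i < h, ∀ j < w, pvG grid i j = pvG grid (i % th) (j % tw) := by
      intro i hi j hj
      have := M i hi j hj
      rwa [pv_tile_getD grid th tw (Nat.mod_lt _ hth) (Nat.mod_lt _ htw)] at this
    constructor
    · intro i hi j hj
      have h1 := M' i hi j hj
      have h2 := M' (i % th) (lt_of_le_of_lt (Nat.mod_le _ _) hi) j hj
      rw [Nat.mod_mod_of_dvd _ (dvd_refl th)] at h2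
      rw [h1, ← h2]
    · intro i hi j hj
      have h1 := M' i hi j hj
      have h2 := M' i hi (j % tw) (lt_of_le_of_lt (Nat.mod_le _ _) hj)
      rw [Nat.mod_mod_of_dvd _ (dvd_refl tw)] at h2
      rw [h1, ← h2]
  · rintro ⟨V, H⟩ i hi j hj
    rw [pv_tile_getD grid th tw (Nat.mod_lt _ hth) (Nat.mod_lt _ htw)]
    rw [V i hi j hj, H (i % th) (lt_of_le_of_lt (Nat.mod_le _ _) hi) j hj]

lemma pv_loopTw_eq (grid : List (List Int)) (h w th : Nat) (hth : 0 < th) :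
    ∀ ts : List Nat, (∀ t ∈ ts, 0 < t) →
    pvLoopTwA grid h w th ts =
      (ts.find? (fun t => w % t == 0 && (pvVert grid h w th && pvHoriz grid h w t))).map
        (fun tw => (List.range th).map (fun i => (grid.getD i []).take tw)) := by
  intro ts
  induction ts with
  | nil => intro _; simp [pvLoopTwA]
  | cons tw rest ih =>
    intro hpos
    have htw : 0 < tw := hpos tw (List.mem_cons_self ..)
    have hrest := ih (fun t ht => hpos t (List.mem_cons_of_mem _ ht))
    by_cases hd : w % tw = 0
    · rw [pvLoopTwA, if_neg (not_not_intro hd), pv_match_eq grid h w hth htw]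
      by_cases hm : (pvVert grid h w th && pvHoriz grid h w tw) = true
      · rw [if_pos hm]
        simp [hd, hm]
      · rw [if_neg hm, hrest]
        simp only [Bool.not_eq_true] at hm
        simp [hd, hm]
    · rw [pvLoopTwA, if_pos hd, hrest]
      have hb : (w % tw == 0) = false := by simpa using hd
      simp [hb]

lemma pv_horiz_w (grid : List (List Int)) (h w : Nat) : pvHoriz grid h w w = true := by
  simp only [pvHoriz, List.all_eq_true, List.mem_range, beq_iff_eq]
  intro i _ j hj
  rw [Nat.mod_eq_of_lt hj]

lemma pv_vert_h (grid : List (List Int)) (h w : Nat) : pvVert grid h w h = true := by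
  simp only [pvVert, List.all_eq_true, List.mem_range, beq_iff_eq]
  intro i hi j _
  rw [Nat.mod_eq_of_lt hi]

lemma pv_findTw_some (grid : List (List Int)) (h w : Nat) (hw : 0 < w) :
    ∃ tw0, (List.range' 1 w).find? (fun t => w % t == 0 && pvHoriz grid h w t) = some tw0 := by
  have hs : ((List.range' 1 w).find? (fun t => w % t == 0 && pvHoriz grid h w t)).isSome := by
    rw [List.find?_isSome]
    exact ⟨w, by rw [List.mem_range'_1]; omega, by simp [Nat.mod_self, pv_horiz_w]⟩
  exact Option.isSome_iff_exists.mp hs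

lemma pv_loopTh_eq (grid : List (List Int)) (h w : Nat) (hw : 0 < w) :
    ∀ ts : List Nat, (∀ t ∈ ts, 0 < t) →
    pvLoopThA grid h w ts =
      (ts.find? (fun t => h % t == 0 && pvVert grid h w t)).map
        (fun th => (List.range th).map (fun i => (grid.getD i []).take
          (((List.range' 1 w).find? (fun t => w % t == 0 && pvHoriz grid h w t)).getD w))) := by
  intro ts
  induction ts with
  | nil => intro _; simp [pvLoopThA]
  | cons th rest ih =>
    intro hpos
    have hth : 0 < th := hpos th (List.mem_cons_self ..)
    have hrest := ih (fun t ht => hpos t (List.mem_cons_of_mem _ ht))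
    by_cases hd : h % th = 0
    · rw [pvLoopThA, if_neg (not_not_intro hd)]
      rw [pv_loopTw_eq grid h w th hth (List.range' 1 w)
            (fun t ht => by rw [List.mem_range'_1] at ht; omega)]
      by_cases hv : pvVert grid h w th = true
      · simp only [hv, Bool.true_and]
        obtain ⟨tw0, htw0⟩ := pv_findTw_some grid h w hw
        have hpred : ((h % th == 0 : Bool) && pvVert grid h w th) = true := by simp [hd, hv]
        simp [hpred, htw0]
      · simp only [Bool.not_eq_true] at hv
        simp only [hv, Bool.false_and, Bool.and_false]
        have hnone : (List.range' 1 w).find? (fun _ => false) = none := by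
          rw [List.find?_eq_none]; simp
        rw [hnone, Option.map_none, Option.none_or, hrest]
        have hpred : ((h % th == 0 : Bool) && pvVert grid h w th) = false := by simp [hv]
        simp [hpred]
    · rw [pvLoopThA, if_pos hd, hrest]
      have hb : (h % th == 0) = false := by simpa using hd
      simp [hb]

lemma pv_loopTh_w0 (grid : List (List Int)) (h : Nat) :
    ∀ ts : List Nat, pvLoopThA grid h 0 ts = none := by
  intro ts
  induction ts with
  | nil => simp [pvLoopThA]
  | cons th rest ih =>
    rw [pvLoopThA]
    by_cases hd : h % th = 0
    · rw [if_neg (not_not_intro hd)]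
      rw [show List.range' 1 0 = [] from rfl]
      rw [show pvLoopTwA grid h 0 th [] = none from rfl, Option.none_or]
      exact ih
    · rw [if_pos hd]; exact ih

lemma pv_findTh_some (grid : List (List Int)) (h w : Nat) (hh : 0 < h) :
    ∃ th0, (List.range' 1 h).find? (fun t => h % t == 0 && pvVert grid h w t) = some th0 := by
  have hs : ((List.range' 1 h).find? (fun t => h % t == 0 && pvVert grid h w t)).isSome := by
    rw [List.find?_isSome]
    exact ⟨h, by rw [List.mem_range'_1]; omega, by simp [Nat.mod_self, pv_vert_h]⟩
  exact Option.isSome_iff_exists.mp hs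

-- ===== VERDICT (by name: the statement is the Claim_ definition above) =====
theorem detect_repeat_unit_py_spec : Claim_equal_detect_repeat_unit_py := by
  intro grid _ _
  unfold Spec_detect_repeat_unit_py detect_repeat_unit_py detect_repeat_unit_py_alt
  cases grid with
  | nil => simp
  | cons r rest =>
    rw [if_neg (by simp)]
    simp only [List.headD_cons]
    by_cases hw : r.length = 0
    · have hre : r.isEmpty = true := by
        simpa [List.isEmpty_iff, List.length_eq_zero_iff] using hw
      rw [if_pos (by simp [hre]), hw, pv_loopTh_w0, Option.getD_none]
    · have hwpos : 0 < r.length := Nat.pos_of_ne_zero hw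
      have hrne : r ≠ [] := fun hh => hw (by simp [hh])
      rw [if_neg (by simp [List.isEmpty_iff, hrne])]
      rw [pv_loopTh_eq (r :: rest) (r :: rest).length r.length hwpos
            (List.range' 1 (r :: rest).length)
            (fun t ht => by rw [List.mem_range'_1] at ht; omega)]
      obtain ⟨th0, hth0⟩ := pv_findTh_some (r :: rest) (r :: rest).length r.length (by simp)
      rw [hth0]
      simp
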